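-- pv_equiv track=rewrite | github.com/AlicjaMM/ASE | ASE1.py | compare_for_whole_table
-- ===== SOURCE A (Python) =====
-- def compare_for_whole_table(table):
--     number_of_comparisons = len(table) - 1
--     number_of_last = len(table) - 1
--     switched = False
--     for i in range(number_of_comparisons):
--         table[number_of_last - i - 1], table[number_of_last - i], switched_now = compare(table[number_of_last - i -1],table[number_of_last - i])
--         if(switched_now):
--             switched = True
--
--     return table, switched
--
-- def compare(almost_last,last):
--     switched = False
--     if (almost_last>last):
--         switched = True
--         return last, almost_last, switched
--     return almost_last, last, switched
-- ===== SOURCE B (Python) =====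
-- def compare_for_whole_table(table):
--     # flag first: a swap happens in the right-to-left pass iff the original
--     # list has some adjacent inversion
--     switched = any(a > b for a, b in zip(table, table[1:]))
--     table[:] = _sift(table)
--     return table, switched
--
--
-- def _sift(xs):
--     # right-to-left bubble pass, built back-to-front: rev holds the sifted
--     # suffix REVERSED (rev[-1] is its head); a new element x either lands in
--     # front of that head or, if it beats it, falls one place behind it
--     rev = []
--     for x in reversed(xs):
--         if rev and x > rev[-1]:
--             rev.insert(len(rev) - 1, x)
--         else:
--             rev.append(x)
--     return rev[::-1]
-- ===== Notes on version B (the rewrite author's own statement) =====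
-- stated objective: alternative
-- what changed: A runs one fused index-based swap loop accumulating the flag via a helper; B computes the flag up front as any adjacent inversion of the original list, and builds the passed list separately back-to-front over reversed(table) with O(1) end operations, with no index arithmetic and no accumulated flag.
import Mathlib
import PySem

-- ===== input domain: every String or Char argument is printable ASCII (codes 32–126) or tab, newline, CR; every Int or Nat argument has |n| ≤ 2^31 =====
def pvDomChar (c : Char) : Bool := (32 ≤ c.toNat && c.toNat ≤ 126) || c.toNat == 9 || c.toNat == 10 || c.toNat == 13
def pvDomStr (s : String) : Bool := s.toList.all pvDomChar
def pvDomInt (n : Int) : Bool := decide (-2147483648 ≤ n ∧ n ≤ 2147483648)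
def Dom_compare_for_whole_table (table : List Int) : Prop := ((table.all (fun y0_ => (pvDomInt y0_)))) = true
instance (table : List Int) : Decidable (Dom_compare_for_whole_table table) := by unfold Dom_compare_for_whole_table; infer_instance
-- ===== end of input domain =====

-- B computes the swap flag up front (any adjacent inversion of the original list) and rebuilds the
-- passed list by structural recursion instead of A's fused indexed swap loop; equivalence is about
-- the RETURN value only (the Python A mutates `table` in place; B writes the same list back via table[:]).


-- ===== PORT A =====
-- helper `compare` of A
def pvCompare (almost_last last : Int) : Int × Int × Bool :=
  if almost_last > last then (last, almost_last, true) else (almost_last, last, false)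

-- one iteration of A's for-loop body (nL = number_of_last); the loop's indices are always in
-- range, so pyGetD/pySetD's defaults are never taken
def pvStepA (nL : Int) (st : List Int × Bool) (i : Int) : List Int × Bool :=
  let r := pvCompare (PySem.List.pyGetD st.1 (nL - i - 1) 0) (PySem.List.pyGetD st.1 (nL - i) 0)
  let t := PySem.List.pySetD st.1 (nL - i - 1) r.1
  let t := PySem.List.pySetD t (nL - i) r.2.1
  (t, if r.2.2 then true else st.2)

def compare_for_whole_table (table : List Int) : List Int × Bool :=
  let number_of_comparisons : Int := (table.length : Int) - 1
  let number_of_last : Int := (table.length : Int) - 1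
  (PySem.List.pyRange 0 number_of_comparisons 1).foldl (pvStepA number_of_last) (table, false)

-- ===== PORT B =====
-- loop body of _sift in Source B: rev holds the sifted suffix reversed (its head last);
-- `rev and x > rev[-1]` is the match on getLast?; rev.insert(len(rev)-1, x) = dropLast ++ [x, last]
def pvSiftStep (rev : List Int) (x : Int) : List Int :=
  match rev.getLast? with
  | none => rev ++ [x]
  | some l => if x > l then rev.dropLast ++ [x, l] else rev ++ [x]

def compare_for_whole_table_alt (table : List Int) : List Int × Bool :=
  let switched := ((table.zip (table.drop 1)).any (fun p => p.1 > p.2))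
  ((table.reverse.foldl pvSiftStep []).reverse, switched)

-- ===== PRECONDITION & SPEC =====
def Spec_compare_for_whole_table (table : List Int) (out : List Int × Bool) : Prop := out = compare_for_whole_table_alt table
instance (table : List Int) (out : List Int × Bool) : Decidable (Spec_compare_for_whole_table table out) := by unfold Spec_compare_for_whole_table; infer_instance

-- ===== CLAIM (what is proved, stated in full; the proofs are below) =====
def Claim_equal_compare_for_whole_table : Prop := ∀ (table : List Int), Dom_compare_for_whole_table table → Spec_compare_for_whole_table table (compare_for_whole_table table)

-- ===== LEMMAS AND PROOFS =====

-- recursive form of B's sift loop, for the proofs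
def pvPlace (x : Int) (rest : List Int) : List Int :=
  match rest with
  | [] => [x]
  | y :: ys => if x > y then y :: x :: ys else x :: y :: ys

def pvSift : List Int → List Int
  | [] => []
  | x :: xs => pvPlace x (pvSift xs)

theorem siftStep_place (r : List Int) (x : Int) :
    (pvSiftStep r x).reverse = pvPlace x r.reverse := by
  rcases hr : r.reverse with _ | ⟨h, t⟩
  · have : r = [] := by simpa using congrArg List.reverse hr
    subst this
    rfl
  · have hr' : r = t.reverse ++ [h] := by
      have := congrArg List.reverse hr
      simpa using this
    subst hr'
    simp only [pvSiftStep, List.getLast?_concat, List.dropLast_concat, pvPlace]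
    by_cases hc : x > h
    · rw [if_pos hc, if_pos hc]
      simp
    · rw [if_neg hc, if_neg hc]
      simp

theorem sift_loop_eq (xs : List Int) :
    (xs.reverse.foldl pvSiftStep []).reverse = pvSift xs := by
  induction xs with
  | nil => rfl
  | cons x xs ih =>
    rw [List.reverse_cons, List.foldl_append]
    simp only [List.foldl]
    rw [siftStep_place, ih]
    rfl

-- the flag B computes, in recursive form
def pvAnyInv : List Int → Bool
  | x :: y :: ys => (decide (x > y)) || pvAnyInv (y :: ys)
  | _ => false

theorem anyInv_eq (xs : List Int) :
    ((xs.zip (xs.drop 1)).any (fun p => p.1 > p.2)) = pvAnyInv xs := by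
  match xs with
  | [] => rfl
  | [x] => rfl
  | x :: y :: ys =>
    simp only [List.drop, List.zip, List.zipWith, List.any, pvAnyInv]
    rw [← anyInv_eq (y :: ys)]
    simp [List.zip]

theorem length_pvSift (xs : List Int) : (pvSift xs).length = xs.length := by
  induction xs with
  | nil => rfl
  | cons x xs ih =>
    show (pvPlace x (pvSift xs)).length = xs.length + 1
    rcases h : pvSift xs with _ | ⟨y, ys⟩ <;> rw [h] at ih
    · simp_all [pvPlace]
    · simp only [pvPlace]
      split <;> simp_all

theorem pvSift_of_sorted (xs : List Int) (h : pvAnyInv xs = false) : pvSift xs = xs := by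
  match xs with
  | [] => rfl
  | [x] => rfl
  | x :: y :: ys =>
    simp only [pvAnyInv, Bool.or_eq_false_iff, decide_eq_false_iff_not, not_lt] at h
    have ih := pvSift_of_sorted (y :: ys) h.2
    show pvPlace x (pvSift (y :: ys)) = x :: y :: ys
    rw [ih]
    simp only [pvPlace]
    rw [if_neg (by omega)]

-- shifting A's loop body across a cons: for indices touching only the tail
theorem stepA_cons (m : Nat) (x : Int) (t : List Int) (s : Bool) (i : Int)
    (_h0 : 0 ≤ i) (h2 : i + 2 ≤ (m : Int)) :
    pvStepA (m : Int) (x :: t, s) i =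
      ((x :: (pvStepA ((m : Int) - 1) (t, s) i).1), (pvStepA ((m : Int) - 1) (t, s) i).2) := by
  simp only [pvStepA]
  have h1 : (1 : Int) ≤ (m : Int) - i - 1 := by omega
  have hg : ∀ (l : List Int) (k : Int), 1 ≤ k →
      PySem.List.pyGetD (x :: l) k 0 = PySem.List.pyGetD l (k - 1) 0 := by
    intro l k hk
    rw [PySem.List.pyGetD_of_nonneg _ 0 (by omega), PySem.List.pyGetD_of_nonneg _ 0 (by omega)]
    have hk' : k.toNat = (k - 1).toNat + 1 := by omega
    rw [hk']
    rfl
  have hs : ∀ (l : List Int) (k : Int) (v : Int), 1 ≤ k →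
      PySem.List.pySetD (x :: l) k v = x :: PySem.List.pySetD l (k - 1) v := by
    intro l k v hk
    rw [PySem.List.pySetD_of_nonneg _ v (by omega), PySem.List.pySetD_of_nonneg _ v (by omega)]
    have hk' : k.toNat = (k - 1).toNat + 1 := by omega
    rw [hk']
    rfl
  rw [hg t ((m : Int) - i - 1) h1, hg t ((m : Int) - i) (by omega),
      hs t ((m : Int) - i - 1) _ h1, hs _ ((m : Int) - i) _ (by omega)]
  have e1 : (m : Int) - i - 1 - 1 = (m : Int) - 1 - i - 1 := by ring
  have e2 : (m : Int) - i - 1 = (m : Int) - 1 - i := by ring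
  rw [e1, e2]

theorem foldl_stepA_cons (m : Nat) (x : Int) (l : List Int)
    (hl : ∀ i ∈ l, 0 ≤ i ∧ i + 2 ≤ (m : Int)) : ∀ (t : List Int) (s : Bool),
    l.foldl (pvStepA (m : Int)) (x :: t, s) =
      ((x :: (l.foldl (pvStepA ((m : Int) - 1)) (t, s)).1),
       (l.foldl (pvStepA ((m : Int) - 1)) (t, s)).2) := by
  induction l with
  | nil => intro t s; rfl
  | cons i l ih =>
    intro t s
    have hi := hl i (by simp)
    simp only [List.foldl]
    rw [stepA_cons m x t s i hi.1 hi.2]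
    have := ih (fun j hj => hl j (List.mem_cons_of_mem _ hj))
      (pvStepA ((m : Int) - 1) (t, s) i).1 (pvStepA ((m : Int) - 1) (t, s) i).2
    simpa using this

-- characterization of A's whole loop
theorem loopA_eq (xs : List Int) :
    compare_for_whole_table xs = (pvSift xs, pvAnyInv xs) := by
  match xs with
  | [] => rfl
  | [x] => rfl
  | x :: y :: ys =>
    have ih := loopA_eq (y :: ys)
    simp only [compare_for_whole_table] at ih ⊢
    set m : Nat := (y :: ys).length with hm
    have hm1 : 1 ≤ m := by simp [hm]
    have hlen : ((x :: y :: ys).length : Int) - 1 = (m : Int) := by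
      simp [hm]
    rw [hlen]
    have hsplit : PySem.List.pyRange 0 (m : Int) 1 =
        PySem.List.pyRange 0 ((m : Int) - 1) 1 ++ [(m : Int) - 1] := by
      have h := PySem.List.pyRange_one_succ_right (a := 0) (b := (m : Int) - 1) (by omega)
      rw [show ((m : Int) - 1) + 1 = (m : Int) by ring] at h
      exact h
    rw [hsplit, List.foldl_append]
    have hmem : ∀ i ∈ PySem.List.pyRange 0 ((m : Int) - 1) 1, 0 ≤ i ∧ i + 2 ≤ (m : Int) := by
      intro i hi
      have := (PySem.List.mem_pyRange_one (a := 0) (b := (m : Int) - 1) (x := i)).1 hi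
      omega
    rw [foldl_stepA_cons m x _ hmem (y :: ys) false]
    have hlen' : ((y :: ys).length : Int) - 1 = (m : Int) - 1 := by simp [hm]
    rw [hlen'] at ih
    rw [ih]
    simp only [List.foldl]
    rcases hsift : pvSift (y :: ys) with _ | ⟨h, t⟩
    · exfalso
      have hl := length_pvSift (y :: ys)
      rw [hsift] at hl
      simp at hl
    · simp only [pvStepA]
      have e0 : (m : Int) - ((m : Int) - 1) - 1 = 0 := by ring
      have e1 : (m : Int) - ((m : Int) - 1) = 1 := by ring
      rw [e0, e1]
      rw [PySem.List.pyGetD_zero_cons]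
      have hg1 : PySem.List.pyGetD (x :: h :: t) 1 0 = h := by
        rw [PySem.List.pyGetD_of_nonneg _ 0 (by omega)]; rfl
      rw [hg1]
      by_cases hc : x > h
      · have hcmp : pvCompare x h = (h, x, true) := by simp [pvCompare, hc]
        rw [hcmp]
        have hflag : pvAnyInv (x :: y :: ys) = true := by
          simp only [pvAnyInv, Bool.or_eq_true, decide_eq_true_eq]
          by_cases hxy : x > y
          · left; exact hxy
          · right
            by_contra hA
            have hA' : pvAnyInv (y :: ys) = false := by
              cases hA2 : pvAnyInv (y :: ys) with
              | false => rfl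
              | true => exact absurd hA2 hA
            have hss := pvSift_of_sorted (y :: ys) hA'
            rw [hsift] at hss
            have hy : h = y := by injection hss
            omega
        have s0 : PySem.List.pySetD (x :: h :: t) 0 h = h :: h :: t := by
          rw [PySem.List.pySetD_of_nonneg _ _ (by omega)]; rfl
        have s1 : PySem.List.pySetD (h :: h :: t) 1 x = h :: x :: t := by
          rw [PySem.List.pySetD_of_nonneg _ _ (by omega)]; rfl
        have hR : pvSift (x :: y :: ys) = pvPlace x (h :: t) := by
          rw [show pvSift (x :: y :: ys) = pvPlace x (pvSift (y :: ys)) from rfl, hsift]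
        simp [s0, s1, hR, pvPlace, hflag, hc]
      · have hcmp : pvCompare x h = (x, h, false) := by simp [pvCompare, hc]
        rw [hcmp]
        have hflag : pvAnyInv (x :: y :: ys) = pvAnyInv (y :: ys) := by
          simp only [pvAnyInv]
          by_cases hA : pvAnyInv (y :: ys) = true
          · simp [hA]
          · have hA' : pvAnyInv (y :: ys) = false := by simpa using hA
            have hss := pvSift_of_sorted (y :: ys) hA'
            rw [hsift] at hss
            have hy : h = y := by injection hss
            have hxy : ¬ x > y := by omega
            simp [hA', hxy]
        have s0 : PySem.List.pySetD (x :: h :: t) 0 x = x :: h :: t := by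
          rw [PySem.List.pySetD_of_nonneg _ _ (by omega)]; rfl
        have s1 : PySem.List.pySetD (x :: h :: t) 1 h = x :: h :: t := by
          rw [PySem.List.pySetD_of_nonneg _ _ (by omega)]; rfl
        have hR : pvSift (x :: y :: ys) = pvPlace x (h :: t) := by
          rw [show pvSift (x :: y :: ys) = pvPlace x (pvSift (y :: ys)) from rfl, hsift]
        simp [s0, s1, hR, pvPlace, hflag, hc]

-- ===== VERDICT (by name: the statement is the Claim_ definition above) =====
theorem compare_for_whole_table_spec : Claim_equal_compare_for_whole_table := by
  intro table _
  show compare_for_whole_table table = compare_for_whole_table_alt table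
  rw [loopA_eq]
  simp only [compare_for_whole_table_alt, anyInv_eq, sift_loop_eq]
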